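-- pv_equiv track=rewrite | github.com/Oichkatzelesfrettschen/steinmarder | src/re/sass/scripts/encoding_analysis.py | find_contiguous_fields
-- ===== SOURCE A (Python) =====
-- def find_contiguous_fields(bits):
--     """Group a sorted list of bit positions into contiguous ranges."""
--     if not bits:
--         return []
--     fields = []
--     start = prev = bits[0]
--     for b in bits[1:]:
--         if b == prev + 1:
--             prev = b
--         else:
--             fields.append((start, prev))
--             start = prev = b
--     fields.append((start, prev))
--     return fields
-- ===== SOURCE B (Python) =====
-- def find_contiguous_fields(bits):
--     """Group a sorted list of bit positions into contiguous ranges."""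
--     steps = list(zip(bits, bits[1:]))
--     starts = bits[:1] + [b for a, b in steps if b != a + 1]
--     ends = [a for a, b in steps if b != a + 1] + bits[-1:]
--     return list(zip(starts, ends))
-- ===== Notes on version B (the rewrite author's own statement) =====
-- stated objective: alternative
-- what changed: Replaces A's single-pass start/prev state machine with staged passes: build adjacent pairs zip(bits, bits[1:]), extract run starts and run ends where the step is not +1, then zip the two boundary lists.
import Mathlib
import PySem

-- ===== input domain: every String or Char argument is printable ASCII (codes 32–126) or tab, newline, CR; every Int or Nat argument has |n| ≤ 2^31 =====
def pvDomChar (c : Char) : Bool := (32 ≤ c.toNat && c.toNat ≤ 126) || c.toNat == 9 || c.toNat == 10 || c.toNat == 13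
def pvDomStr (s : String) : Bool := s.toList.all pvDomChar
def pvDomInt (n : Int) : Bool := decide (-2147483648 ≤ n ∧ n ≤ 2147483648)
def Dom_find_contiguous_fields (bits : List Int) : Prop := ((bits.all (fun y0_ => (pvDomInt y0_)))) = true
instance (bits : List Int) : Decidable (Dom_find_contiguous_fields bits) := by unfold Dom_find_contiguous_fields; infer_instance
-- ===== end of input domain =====

-- B replaces A's single-pass start/prev state machine by staged passes: collect the
-- adjacent pairs zip(bits, bits[1:]), extract run starts and run ends where the step
-- is not +1, and zip them together (alternative decomposition, same O(n) cost).

-- ===== PORT A =====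
-- A's loop: fields accumulator, start/prev state, one pass over bits[1:]
def pvGoA (fields : List (Int × Int)) (start prev : Int) : List Int → List (Int × Int)
  | [] => fields ++ [(start, prev)]
  | b :: rest =>
      if b = prev + 1 then pvGoA fields start b rest
      else pvGoA (fields ++ [(start, prev)]) b b rest

def find_contiguous_fields (bits : List Int) : List (Int × Int) :=
  match bits with
  | [] => []
  | b :: rest => pvGoA [] b b rest

-- ===== PORT B =====
-- the gap test 'b != a + 1' on an adjacent pair (a, b)
def pvGap (p : Int × Int) : Bool := decide (p.2 ≠ p.1 + 1)

def find_contiguous_fields_alt (bits : List Int) : List (Int × Int) :=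
  -- steps = list(zip(bits, bits[1:]))
  let steps := bits.zip (PySem.List.slice bits (some 1) none)
  -- starts = bits[:1] + [b for a, b in steps if b != a + 1]
  let starts := PySem.List.slice bits none (some 1) ++ (steps.filter pvGap).map Prod.snd
  -- ends = [a for a, b in steps if b != a + 1] + bits[-1:]
  let ends := (steps.filter pvGap).map Prod.fst ++ PySem.List.slice bits (some (-1)) none
  starts.zip ends

-- ===== PRECONDITION & SPEC =====
def Spec_find_contiguous_fields (bits : List Int) (out : List (Int × Int)) : Prop := out = find_contiguous_fields_alt bits
instance (bits : List Int) (out : List (Int × Int)) : Decidable (Spec_find_contiguous_fields bits out) := by unfold Spec_find_contiguous_fields; infer_instance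

-- ===== CLAIM (what is proved, stated in full; the proofs are below) =====
def Claim_equal_find_contiguous_fields : Prop := ∀ (bits : List Int), Dom_find_contiguous_fields bits → Spec_find_contiguous_fields bits (find_contiguous_fields bits)

-- ===== LEMMAS AND PROOFS =====

-- bits[-1:] of a nonempty list is its last element
lemma pvDropLast (b : Int) (t : List Int) :
    List.drop t.length (b :: t) = [(b :: t).getLast (by simp)] := by
  induction t generalizing b with
  | nil => simp
  | cons c u ih =>
      rw [List.getLast_cons (by simp)]
      simpa using ih c

-- run of A's loop from state (s, p) over rest equals zip of boundary lists of (p :: rest)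
lemma pvGoA_zip (rest : List Int) : ∀ (acc : List (Int × Int)) (s p : Int),
    pvGoA acc s p rest =
      acc ++ (s :: (((p :: rest).zip rest).filter pvGap).map Prod.snd).zip
        ((((p :: rest).zip rest).filter pvGap).map Prod.fst ++ [(p :: rest).getLast (by simp)]) := by
  induction rest with
  | nil => intro acc s p; simp [pvGoA]
  | cons b t ih =>
      intro acc s p
      by_cases h : b = p + 1
      · have hg : pvGap (p, b) = false := by simp [pvGap, h]
        simp only [pvGoA, if_pos h, List.zip_cons_cons, List.filter_cons, hg]
        rw [ih acc s b]
        congr 1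
      · have hg : pvGap (p, b) = true := by simp [pvGap, h]
        simp only [pvGoA, if_neg h, List.zip_cons_cons, List.filter_cons, hg]
        rw [ih (acc ++ [(s, p)]) b b]
        simp only [List.cons_append, List.append_assoc]
        congr 2

-- ===== VERDICT (by name: the statement is the Claim_ definition above) =====
theorem find_contiguous_fields_spec : Claim_equal_find_contiguous_fields := by
  intro bits _
  unfold Spec_find_contiguous_fields find_contiguous_fields find_contiguous_fields_alt
  cases bits with
  | nil => decide
  | cons b rest =>
      show pvGoA [] b b rest = _
      rw [pvGoA_zip rest [] b b]
      rw [PySem.List.slice_from_one, PySem.List.slice_from_neg_one]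
      have h1 : PySem.List.slice (b :: rest) none (some 1) = [b] := by
        have := PySem.List.slice_to_natCast (b :: rest) 1
        simpa using this
      rw [h1]
      simp only [List.length_cons, Nat.add_sub_cancel, pvDropLast]
      simp [List.tail]
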